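-- pv_equiv track=rewrite | github.com/TimKozak/Lab0_Task1 | skyscrapers.py | check_uniqueness_in_rows
-- ===== SOURCE A (Python) =====
-- def check_uniqueness_in_rows(board: list):
--     """
--     Check buildings of unique height in each row.
--
--     Return True if buildings in a row have unique length, False otherwise.
--
--     >>> check_uniqueness_in_rows(['***21**', '412453*', '423145*', \
--     '*543215', '*35214*', '*41532*', '*2*1***'])
--     True
--     >>> check_uniqueness_in_rows(['***21**', '452453*', '423145*', \
--     '*543215', '*35214*', '*41532*', '*2*1***'])
--     False
--     >>> check_uniqueness_in_rows(['***21**', '412453*', '423145*', \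
--     '*553215', '*35214*', '*41532*', '*2*1***'])
--     False
--     """
--     board = board[1:-1]
--     for line in board:
--
--         line = line[1:-1]
--
--         for num in line:
--             if line.count(num) > 1:
--                 return False
--
--     return True
-- ===== SOURCE B (Python) =====
-- def _has_adjacent_dup(s):
--     for a, b in zip(s, s[1:]):
--         if a == b:
--             return True
--     return False
--
--
-- def check_uniqueness_in_rows(board: list):
--     """Sort each inner row slice, then a single adjacency scan finds duplicates."""
--     for line in board[1:-1]:
--         if _has_adjacent_dup(sorted(line[1:-1])):
--             return False
--     return True
-- ===== Notes on version B (the rewrite author's own statement) =====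
-- stated objective: alternative
-- what changed: Replaces the per-character count() rescans with sort-then-single-adjacency-scan duplicate detection per row.
import Mathlib
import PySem

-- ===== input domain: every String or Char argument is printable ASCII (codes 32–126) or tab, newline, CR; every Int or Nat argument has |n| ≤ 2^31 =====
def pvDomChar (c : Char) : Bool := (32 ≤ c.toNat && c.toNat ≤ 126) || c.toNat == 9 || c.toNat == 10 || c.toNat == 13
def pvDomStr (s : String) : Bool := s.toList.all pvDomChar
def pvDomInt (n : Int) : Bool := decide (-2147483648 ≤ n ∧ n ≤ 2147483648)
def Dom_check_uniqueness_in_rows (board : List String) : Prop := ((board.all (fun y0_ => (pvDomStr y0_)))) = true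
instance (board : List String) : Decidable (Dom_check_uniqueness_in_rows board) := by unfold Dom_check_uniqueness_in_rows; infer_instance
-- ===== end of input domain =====

-- B replaces A's per-character count() rescans by sorting each inner row slice and
-- making one adjacency scan; same return value on every input (A is total).

-- ===== PORT A =====
-- 'for num in line: if line.count(num) > 1: return False' — inner loop; early return = all
def check_uniqueness_in_rows (board : List String) : Bool :=
  let board' := PySem.List.slice board (some 1) (some (-1))
  board'.all (fun line =>
    let l := (PySem.Str.slice line (some 1) (some (-1))).toList
    l.all (fun num => !decide (l.count num > 1)))

-- ===== PORT B =====
-- 'for a, b in zip(s, s[1:]): if a == b: return True' — adjacency scan on the sorted row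
def pvHasAdjacentDup (s : List Char) : Bool :=
  (s.zip (s.drop 1)).any (fun p => p.1 == p.2)

def check_uniqueness_in_rows_alt (board : List String) : Bool :=
  (PySem.List.slice board (some 1) (some (-1))).all (fun line =>
    !pvHasAdjacentDup
      (PySem.List.sorted (PySem.Str.slice line (some 1) (some (-1))).toList (fun x => x) false))

-- ===== PRECONDITION & SPEC =====
def Spec_check_uniqueness_in_rows (board : List String) (out : Bool) : Prop := out = check_uniqueness_in_rows_alt board
instance (board : List String) (out : Bool) : Decidable (Spec_check_uniqueness_in_rows board out) := by unfold Spec_check_uniqueness_in_rows; infer_instance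

-- ===== CLAIM (what is proved, stated in full; the proofs are below) =====
def Claim_equal_check_uniqueness_in_rows : Prop := ∀ (board : List String), Dom_check_uniqueness_in_rows board → Spec_check_uniqueness_in_rows board (check_uniqueness_in_rows board)

-- ===== LEMMAS AND PROOFS =====

-- A's inner loop decides "no character occurs twice", i.e. Nodup.
theorem pv_all_count_eq_nodup (l : List Char) :
    (l.all (fun num => !decide (l.count num > 1))) = decide l.Nodup := by
  by_cases h : l.Nodup
  · simp only [h, decide_true, List.all_eq_true]
    intro a _
    have := List.nodup_iff_count_le_one.mp h a
    simp
    omega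
  · simp only [h, decide_false]
    rw [List.all_eq_false]
    rcases not_forall.mp (fun hc => h (List.nodup_iff_count_le_one.mpr hc)) with ⟨a, ha⟩
    have hlt : 1 < l.count a := by omega
    exact ⟨a, List.count_pos_iff.mp (by omega), by simp; omega⟩

-- On a weakly increasing list, the adjacency scan decides duplication.
theorem pv_adj_sorted (l : List Char) (h : l.Pairwise (· ≤ ·)) :
    pvHasAdjacentDup l = !decide l.Nodup := by
  induction l with
  | nil => simp [pvHasAdjacentDup]
  | cons a t ih =>
    cases t with
    | nil => simp [pvHasAdjacentDup]
    | cons b t' =>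
      have h' : (b :: t').Pairwise (· ≤ ·) := h.tail
      have hab : a ≤ b := (List.pairwise_cons.mp h).1 b (by simp)
      have ht := ih h'
      simp only [pvHasAdjacentDup, List.drop_one, List.tail_cons, List.zip_cons_cons,
        List.any_cons] at *
      by_cases hd : a = b
      · subst hd
        have : ¬ (a :: a :: t').Nodup := by simp
        simp [this]
      · have hmem : a ∉ b :: t' := by
          intro hm
          rcases List.mem_cons.mp hm with h1 | h2
          · exact hd h1
          · have hba : b ≤ a := (List.pairwise_cons.mp h').1 a h2
            exact hd (le_antisymm hab hba)
        have : (a :: b :: t').Nodup ↔ (b :: t').Nodup := by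
          constructor
          · exact fun hn => hn.tail
          · exact fun hn => List.nodup_cons.mpr ⟨hmem, hn⟩
        by_cases hn : (b :: t').Nodup
        · simp [hd, ht, hn, this.mpr hn]
        · have : ¬ (a :: b :: t').Nodup := fun hc => hn (this.mp hc)
          simp [ht, hn, this]

theorem pv_line_eq (line : String) :
    (let l := (PySem.Str.slice line (some 1) (some (-1))).toList
     l.all (fun num => !decide (l.count num > 1)))
    = !pvHasAdjacentDup
        (PySem.List.sorted (PySem.Str.slice line (some 1) (some (-1))).toList (fun x => x) false) := by
  set l := (PySem.Str.slice line (some 1) (some (-1))).toList with hl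
  have hp : (PySem.List.sorted l (fun x => x) false).Pairwise (· ≤ ·) :=
    PySem.List.sorted_pairwise l (fun x => x)
  have hperm := PySem.List.sorted_perm l (fun x => x) false
  rw [pv_all_count_eq_nodup, pv_adj_sorted _ hp, Bool.not_not]
  simp [hperm.nodup_iff]

-- ===== VERDICT (by name: the statement is the Claim_ definition above) =====
theorem check_uniqueness_in_rows_spec : Claim_equal_check_uniqueness_in_rows := by
  intro board _
  unfold Spec_check_uniqueness_in_rows check_uniqueness_in_rows check_uniqueness_in_rows_alt
  exact congrArg _ (funext fun line => pv_line_eq line)
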